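-- pv_equiv track=rewrite | github.com/MYKLWCS/Lycan-Data | modules/crawlers/public_nsopw.py | _parse_offenders
-- ===== SOURCE A (Python) =====
-- from typing import Any
--
-- _MAX_RESULTS = 50
--
-- def _parse_offenders(data: dict) -> list[dict[str, Any]]:
--     """
--     Normalise NSOPW API response into a list of offender records.
--
--     Expected JSON shape:
--       {TotalRecordCount, Records: [{FullName, Address, City, State, DOB, Conviction}]}
--     """
--     offenders: list[dict[str, Any]] = []
--     for item in data.get("Records", [])[:_MAX_RESULTS]:
--         offenders.append(
--             {
--                 "name": item.get("FullName", ""),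
--                 "address": item.get("Address", ""),
--                 "city": item.get("City", ""),
--                 "state": item.get("State", ""),
--                 "dob": item.get("DOB", ""),
--                 "conviction": item.get("Conviction", ""),
--             }
--         )
--     return offenders
-- ===== SOURCE B (Python) =====
-- from typing import Any
--
-- _MAX_RESULTS = 50
--
-- _FIELD_MAP = [
--     ("name", "FullName"),
--     ("address", "Address"),
--     ("city", "City"),
--     ("state", "State"),
--     ("dob", "DOB"),
--     ("conviction", "Conviction"),
-- ]
--
-- def _parse_offenders(data: dict) -> list[dict[str, Any]]:
--     records = data.get("Records", [])[:_MAX_RESULTS]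
--     # field-major: extract one column per output field, then transpose back into rows
--     columns = [(out, [item.get(inp, "") for item in records]) for out, inp in _FIELD_MAP]
--     keys = [k for k, _ in columns]
--     return [dict(zip(keys, row)) for row in zip(*(col for _, col in columns))]
-- ===== Notes on version B (the rewrite author's own statement) =====
-- stated objective: alternative
-- what changed: Field-major instead of record-major: B extracts one column list per output field in staged passes and then zip-transposes the columns back into per-record dicts, instead of A's single pass appending a six-field dict per record.
import Mathlib
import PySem

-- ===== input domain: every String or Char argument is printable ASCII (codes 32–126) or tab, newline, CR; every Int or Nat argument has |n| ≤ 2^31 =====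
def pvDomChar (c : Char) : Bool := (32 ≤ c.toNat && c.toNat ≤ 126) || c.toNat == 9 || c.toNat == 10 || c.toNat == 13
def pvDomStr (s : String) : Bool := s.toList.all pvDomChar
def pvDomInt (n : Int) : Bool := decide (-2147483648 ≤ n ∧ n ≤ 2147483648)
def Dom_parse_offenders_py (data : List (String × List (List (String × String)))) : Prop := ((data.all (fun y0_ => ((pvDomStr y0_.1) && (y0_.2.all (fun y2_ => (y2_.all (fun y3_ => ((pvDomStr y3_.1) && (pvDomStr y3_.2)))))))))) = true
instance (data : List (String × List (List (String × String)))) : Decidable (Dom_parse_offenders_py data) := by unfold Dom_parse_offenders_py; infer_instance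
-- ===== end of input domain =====

-- B is field-major: it extracts one column per output field and zip-transposes the columns into rows (alternative decomposition; same cost).
-- ===== PORT A =====
def parse_offenders_py (data : List (String × List (List (String × String)))) : List (List (String × String)) :=
  (PySem.List.slice ((PySem.Dict.mk data).getD "Records" []) none (some 50)).foldl
    (fun offenders item =>
      offenders ++ [[("name", (PySem.Dict.mk item).getD "FullName" ""),
                     ("address", (PySem.Dict.mk item).getD "Address" ""),
                     ("city", (PySem.Dict.mk item).getD "City" ""),
                     ("state", (PySem.Dict.mk item).getD "State" ""),
                     ("dob", (PySem.Dict.mk item).getD "DOB" ""),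
                     ("conviction", (PySem.Dict.mk item).getD "Conviction" "")]]) []

-- ===== PORT B =====
def pvFieldMap : List (String × String) :=
  [("name", "FullName"), ("address", "Address"), ("city", "City"),
   ("state", "State"), ("dob", "DOB"), ("conviction", "Conviction")]

-- Python's zip(*cols): take one head from every column, stop when any column is exhausted
-- (zip() of zero iterables also yields nothing).
def pvZipCols (cols : List (List String)) : List (List String) :=
  if h : cols ≠ [] ∧ cols.all (fun c => !c.isEmpty) then
    cols.map (fun c => c.headD "") :: pvZipCols (cols.map List.tail)
  else []
termination_by (cols.headD []).length
decreasing_by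
  obtain ⟨hne, hall⟩ := h
  cases cols with
  | nil => exact absurd rfl hne
  | cons c cs =>
    have hc : c ≠ [] := by
      have := List.all_eq_true.mp hall c (by simp)
      simpa [List.isEmpty_iff] using this
    cases c with
    | nil => exact absurd rfl hc
    | cons x xs => simp

def parse_offenders_py_alt (data : List (String × List (List (String × String)))) : List (List (String × String)) :=
  let records := PySem.List.slice ((PySem.Dict.mk data).getD "Records" []) none (some 50)
  let columns := pvFieldMap.map
    (fun p => (p.1, records.map (fun item => (PySem.Dict.mk item).getD p.2 "")))
  let keys := columns.map Prod.fst
  (pvZipCols (columns.map Prod.snd)).map (fun row => keys.zip row)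

-- ===== PRECONDITION & SPEC =====
def Spec_parse_offenders_py (data : List (String × List (List (String × String)))) (out : List (List (String × String))) : Prop := out = parse_offenders_py_alt data
instance (data : List (String × List (List (String × String)))) (out : List (List (String × String))) : Decidable (Spec_parse_offenders_py data out) := by unfold Spec_parse_offenders_py; infer_instance

-- ===== CLAIM (what is proved, stated in full; the proofs are below) =====
def Claim_equal_parse_offenders_py : Prop := ∀ (data : List (String × List (List (String × String)))), Dom_parse_offenders_py data → Spec_parse_offenders_py data (parse_offenders_py data)

-- ===== LEMMAS AND PROOFS =====
theorem pv_foldl_append_map {α β : Type} (f : α → β) (l : List α) (acc : List β) :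
    l.foldl (fun acc x => acc ++ [f x]) acc = acc ++ l.map f := by
  induction l generalizing acc with
  | nil => simp
  | cons x xs ih => simp [List.foldl, ih]

-- transposing field-major columns built from `recs` recovers the record-major rows
theorem pv_zipCols_map {α : Type} (g : α → String → String) (fm : List (String × String))
    (hfm : fm ≠ []) (recs : List α) :
    pvZipCols (fm.map (fun p => recs.map (fun item => g item p.2)))
      = recs.map (fun item => fm.map (fun p => g item p.2)) := by
  induction recs with
  | nil =>
    rw [pvZipCols]
    simp only [List.map_nil]
    rw [dif_neg]
    intro ⟨_, hall⟩
    cases fm with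
    | nil => exact absurd rfl hfm
    | cons p ps =>
      have := List.all_eq_true.mp hall [] (by simp [List.map])
      simp at this
  | cons r rs ih =>
    rw [pvZipCols]
    rw [dif_pos]
    · simp only [List.map_map, Function.comp_def, List.map_cons, List.headD_cons,
        List.tail_cons, ih]
    · constructor
      · cases fm with
        | nil => exact absurd rfl hfm
        | cons p ps => simp
      · rw [List.all_eq_true]; intro c hc
        rw [List.mem_map] at hc
        obtain ⟨p, _, rfl⟩ := hc
        simp

theorem pv_zip_map_fst {α : Type} (fm : List (String × String)) (h : α → String → String) (item : α) :
    (fm.map Prod.fst).zip (fm.map (fun p => h item p.2))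
      = fm.map (fun p => (p.1, h item p.2)) := by
  rw [List.zip_map']

-- ===== VERDICT (by name: the statement is the Claim_ definition above) =====
theorem parse_offenders_py_spec : Claim_equal_parse_offenders_py := by
  intro data _
  unfold Spec_parse_offenders_py parse_offenders_py parse_offenders_py_alt
  rw [pv_foldl_append_map]
  simp only [List.nil_append, List.map_map, Function.comp_def]
  rw [pv_zipCols_map (fun item k => (PySem.Dict.mk item).getD k "") pvFieldMap (by simp [pvFieldMap])]
  rw [List.map_map]
  apply List.map_congr_left
  intro item _
  simp only [Function.comp_def]
  rw [pv_zip_map_fst pvFieldMap (fun item k => (PySem.Dict.mk item).getD k "") item]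
  simp [pvFieldMap]
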